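-- pv_equiv track=rewrite | github.com/houzhenliu/rlaux | rlaux/web.py | _build_gpu_overview
-- ===== SOURCE A (Python) =====
-- from typing import Any
--
-- def _build_gpu_overview(
--     managed_gpu_stats: dict[int, dict[str, int | None]],
--     detected: list[dict[str, Any]],
-- ) -> dict[str, int]:
--     managed_pct = 0
--     for stats in managed_gpu_stats.values():
--         util = stats.get("gpu_util_pct")
--         if util is not None:
--             managed_pct += max(0, int(util))
--
--     unmanaged_pct = 0
--     for proc in detected:
--         if bool(proc.get("managed")):
--             continue
--         util = proc.get("gpu_util_pct")
--         if util is not None: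
--             unmanaged_pct += max(0, int(util))
--
--     total = managed_pct + unmanaged_pct
--     if total > 100:
--         overflow = total - 100
--         unmanaged_pct = max(0, unmanaged_pct - overflow)
--         total = managed_pct + unmanaged_pct
--         if total > 100:
--             managed_pct = max(0, 100 - unmanaged_pct)
--             total = managed_pct + unmanaged_pct
--
--     idle_pct = max(0, 100 - total)
--     return {
--         "managed_pct": managed_pct,
--         "unmanaged_pct": unmanaged_pct,
--         "idle_pct": idle_pct,
--         "total_pct": min(100, managed_pct + unmanaged_pct),
--     }
-- ===== SOURCE B (Python) =====
-- def _build_gpu_overview(managed_gpu_stats, detected):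
--     # One tagged stream of utilization contributions (0 = managed, 1 = unmanaged),
--     # consumed by a single accumulation pass; then a priority budget-allocation
--     # fold distributes the 100 points, leftover budget being the idle percentage.
--     def contributions():
--         for stats in managed_gpu_stats.values():
--             yield 0, stats.get("gpu_util_pct")
--         for proc in detected:
--             if not proc.get("managed"):
--                 yield 1, proc.get("gpu_util_pct")
--
--     sums = [0, 0]
--     for idx, util in contributions():
--         if util is not None:
--             sums[idx] += max(0, int(util))
--
--     pcts = []
--     remaining = 100
--     for s in sums:
--         take = min(s, remaining)
--         pcts.append(take)
--         remaining -= take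
--     managed_pct, unmanaged_pct = pcts
--
--     return {
--         "managed_pct": managed_pct,
--         "unmanaged_pct": unmanaged_pct,
--         "idle_pct": remaining,
--         "total_pct": 100 - remaining,
--     }
-- ===== Notes on version B (the rewrite author's own statement) =====
-- stated objective: alternative
-- what changed: B merges both sources into one tagged contribution stream consumed by a single accumulation pass, then replaces the nested overflow-adjustment block with a priority budget-allocation fold: each category takes min(sum, remaining) from a 100-point budget, and the leftover budget is the idle percentage.
import Mathlib
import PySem

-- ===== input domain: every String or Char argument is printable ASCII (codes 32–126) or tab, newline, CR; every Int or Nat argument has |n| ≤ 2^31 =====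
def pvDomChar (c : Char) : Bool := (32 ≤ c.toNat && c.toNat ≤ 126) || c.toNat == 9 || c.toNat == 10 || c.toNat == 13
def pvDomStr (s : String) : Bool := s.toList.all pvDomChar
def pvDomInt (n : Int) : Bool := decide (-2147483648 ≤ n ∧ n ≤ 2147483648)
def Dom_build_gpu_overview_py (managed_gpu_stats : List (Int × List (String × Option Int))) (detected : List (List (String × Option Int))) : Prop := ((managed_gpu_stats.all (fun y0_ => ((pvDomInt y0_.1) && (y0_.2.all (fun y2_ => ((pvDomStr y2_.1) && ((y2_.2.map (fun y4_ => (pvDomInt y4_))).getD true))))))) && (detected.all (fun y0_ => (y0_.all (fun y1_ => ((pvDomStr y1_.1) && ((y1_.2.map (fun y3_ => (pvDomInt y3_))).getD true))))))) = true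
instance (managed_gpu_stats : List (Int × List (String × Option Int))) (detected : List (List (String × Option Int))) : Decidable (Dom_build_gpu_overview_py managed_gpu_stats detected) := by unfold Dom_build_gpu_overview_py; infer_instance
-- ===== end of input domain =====

-- B merges both sources into one tagged contribution stream consumed by a single
-- accumulation pass, and replaces A's nested overflow-adjustment block with a
-- priority budget-allocation fold over a 100-point budget; objective: alternative.


-- ===== PORT A =====
-- loop body of 'for stats in managed_gpu_stats.values(): ...'
def pvLoopM (acc : Int) (stats : List (String × Option Int)) : Int :=
  match (PySem.Dict.ofList stats).get? "gpu_util_pct" with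
  | some (some util) => acc + max 0 util
  | _ => acc

-- loop body of 'for proc in detected: ...'
def pvLoopU (acc : Int) (proc : List (String × Option Int)) : Int :=
  if (match (PySem.Dict.ofList proc).get? "managed" with
      | some (some v) => v != 0
      | _ => false) then acc
  else
    match (PySem.Dict.ofList proc).get? "gpu_util_pct" with
    | some (some util) => acc + max 0 util
    | _ => acc

def build_gpu_overview_py (managed_gpu_stats : List (Int × List (String × Option Int))) (detected : List (List (String × Option Int))) : List (String × Int) :=
  -- for stats in managed_gpu_stats.values(): util = stats.get("gpu_util_pct"); if util is not None: ...
  let managed_pct : Int := (PySem.Dict.ofList managed_gpu_stats).values.foldl pvLoopM 0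
  -- for proc in detected: if bool(proc.get("managed")): continue; ...
  let unmanaged_pct : Int := detected.foldl pvLoopU 0
  let total := managed_pct + unmanaged_pct
  -- the nested overflow-adjustment block, reassignments threaded through
  let s : Int × Int × Int :=
    if total > 100 then
      let overflow := total - 100
      let unmanaged_pct := max 0 (unmanaged_pct - overflow)
      let total := managed_pct + unmanaged_pct
      if total > 100 then
        let managed_pct := max 0 (100 - unmanaged_pct)
        let total := managed_pct + unmanaged_pct
        (managed_pct, unmanaged_pct, total)
      else (managed_pct, unmanaged_pct, total)
    else (managed_pct, unmanaged_pct, total)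
  let managed_pct := s.1
  let unmanaged_pct := s.2.1
  let total := s.2.2
  let idle_pct := max 0 (100 - total)
  [("managed_pct", managed_pct), ("unmanaged_pct", unmanaged_pct),
   ("idle_pct", idle_pct), ("total_pct", min 100 (managed_pct + unmanaged_pct))]

-- ===== PORT B =====
-- s.get("gpu_util_pct") (missing key and stored None both yield None)
def pvUtil? (stats : List (String × Option Int)) : Option Int :=
  ((PySem.Dict.ofList stats).get? "gpu_util_pct").join

-- truthiness of p.get("managed")
def pvManaged (proc : List (String × Option Int)) : Bool :=
  match (PySem.Dict.ofList proc).get? "managed" with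
  | some (some v) => v != 0
  | _ => false

-- body of 'for idx, util in contributions(): if util is not None: sums[idx] += max(0, int(util))'
def pvStep (acc : Int × Int) (item : Nat × Option Int) : Int × Int :=
  match item.2 with
  | some util => if item.1 = 0 then (acc.1 + max 0 util, acc.2) else (acc.1, acc.2 + max 0 util)
  | none => acc

-- body of 'for s in sums: take = min(s, remaining); pcts.append(take); remaining -= take'
def pvAlloc (st : List Int × Int) (s : Int) : List Int × Int :=
  let take := min s st.2
  (st.1 ++ [take], st.2 - take)

def build_gpu_overview_py_alt (managed_gpu_stats : List (Int × List (String × Option Int))) (detected : List (List (String × Option Int))) : List (String × Int) :=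
  -- contributions(): tagged stream, managed first, then unmanaged-detected
  let contribs : List (Nat × Option Int) :=
    ((PySem.Dict.ofList managed_gpu_stats).values.map (fun s => ((0 : Nat), pvUtil? s)))
    ++ ((detected.filter (fun p => !pvManaged p)).map (fun p => ((1 : Nat), pvUtil? p)))
  let sums : Int × Int := contribs.foldl pvStep (0, 0)
  -- priority budget allocation of 100 points
  let alloc : List Int × Int := [sums.1, sums.2].foldl pvAlloc ([], 100)
  match alloc.1, alloc.2 with
  | [managed_pct, unmanaged_pct], remaining =>
      [("managed_pct", managed_pct), ("unmanaged_pct", unmanaged_pct),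
       ("idle_pct", remaining), ("total_pct", 100 - remaining)]
  | _, _ => []

-- ===== PRECONDITION & SPEC =====
def Spec_build_gpu_overview_py (managed_gpu_stats : List (Int × List (String × Option Int))) (detected : List (List (String × Option Int))) (out : List (String × Int)) : Prop := out = build_gpu_overview_py_alt managed_gpu_stats detected
instance (managed_gpu_stats : List (Int × List (String × Option Int))) (detected : List (List (String × Option Int))) (out : List (String × Int)) : Decidable (Spec_build_gpu_overview_py managed_gpu_stats detected out) := by unfold Spec_build_gpu_overview_py; infer_instance

-- ===== CLAIM =====
def Claim_equal_build_gpu_overview_py : Prop := ∀ (managed_gpu_stats : List (Int × List (String × Option Int))) (detected : List (List (String × Option Int))), Dom_build_gpu_overview_py managed_gpu_stats detected → Spec_build_gpu_overview_py managed_gpu_stats detected (build_gpu_overview_py managed_gpu_stats detected)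

-- ===== LEMMAS AND PROOFS =====

-- the tagged-0 prefix of B's single pass is A's managed loop (second component untouched)
theorem foldl_step_managed (l : List (List (String × Option Int))) (acc : Int × Int) :
    (l.map (fun s => ((0 : Nat), pvUtil? s))).foldl pvStep acc
      = (l.foldl pvLoopM acc.1, acc.2) := by
  induction l generalizing acc with
  | nil => simp
  | cons s rest ih =>
    have hstep : pvStep acc ((0 : Nat), pvUtil? s) = (pvLoopM acc.1 s, acc.2) := by
      simp only [pvStep, pvLoopM, pvUtil?]
      cases h : (PySem.Dict.ofList s).get? "gpu_util_pct" with
      | none => simp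
      | some o => cases o with
        | none => simp
        | some u => simp
    simp only [List.map_cons, List.foldl_cons, hstep, ih]

-- the tagged-1 suffix of B's single pass is A's unmanaged loop (first component untouched)
theorem foldl_step_unmanaged (l : List (List (String × Option Int))) (acc : Int × Int) :
    ((l.filter (fun p => !pvManaged p)).map (fun p => ((1 : Nat), pvUtil? p))).foldl pvStep acc
      = (acc.1, l.foldl pvLoopU acc.2) := by
  induction l generalizing acc with
  | nil => simp
  | cons p rest ih =>
    simp only [List.filter_cons, List.foldl_cons, pvLoopU]
    by_cases hm : pvManaged p
    · have h' : (match (PySem.Dict.ofList p).get? "managed" with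
          | some (some v) => v != 0
          | _ => false) = true := hm
      simp [hm, h', ih]
    · have h' : (match (PySem.Dict.ofList p).get? "managed" with
          | some (some v) => v != 0
          | _ => false) = false := by simpa [pvManaged] using hm
      have hstep : pvStep acc ((1 : Nat), pvUtil? p)
          = (acc.1, match (PySem.Dict.ofList p).get? "gpu_util_pct" with
                    | some (some util) => acc.2 + max 0 util
                    | _ => acc.2) := by
        simp only [pvStep, pvUtil?]
        cases h : (PySem.Dict.ofList p).get? "gpu_util_pct" with
        | none => simp
        | some o => cases o with
          | none => simp
          | some u => simp
      simp only [hm, h', Bool.not_false, if_true, List.map_cons, List.foldl_cons, hstep, ih]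
      simp

-- A's loops never push the accumulator down
theorem loopM_mono (l : List (List (String × Option Int))) (acc : Int) :
    acc ≤ l.foldl pvLoopM acc := by
  induction l generalizing acc with
  | nil => simp
  | cons s rest ih =>
    have hstep : acc ≤ pvLoopM acc s := by
      unfold pvLoopM
      cases h : (PySem.Dict.ofList s).get? "gpu_util_pct" with
      | none => exact le_refl acc
      | some o => cases o with
        | none => exact le_refl acc
        | some u =>
          show acc ≤ acc + max 0 u
          omega
    exact le_trans hstep (ih (pvLoopM acc s))

theorem loopU_mono (l : List (List (String × Option Int))) (acc : Int) :
    acc ≤ l.foldl pvLoopU acc := by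
  induction l generalizing acc with
  | nil => simp
  | cons p rest ih =>
    have hstep : acc ≤ pvLoopU acc p := by
      unfold pvLoopU
      split_ifs
      · exact le_refl acc
      · cases h : (PySem.Dict.ofList p).get? "gpu_util_pct" with
        | none => exact le_refl acc
        | some o => cases o with
          | none => exact le_refl acc
          | some u =>
          show acc ≤ acc + max 0 u
          omega
    exact le_trans hstep (ih (pvLoopU acc p))

-- ===== VERDICT =====
theorem build_gpu_overview_py_spec : Claim_equal_build_gpu_overview_py := by
  intro mgs detected _
  show build_gpu_overview_py mgs detected = build_gpu_overview_py_alt mgs detected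
  simp only [build_gpu_overview_py, build_gpu_overview_py_alt, List.foldl_append,
    foldl_step_managed, foldl_step_unmanaged, List.foldl_cons, List.foldl_nil, pvAlloc]
  have hm := loopM_mono (PySem.Dict.ofList mgs).values 0
  have hu := loopU_mono detected 0
  set m := (PySem.Dict.ofList mgs).values.foldl pvLoopM 0 with hmdef
  set u := detected.foldl pvLoopU 0 with hudef
  simp only [List.nil_append, List.cons_append, List.append_nil]
  split_ifs with h1 h2 <;>
    simp only [List.cons.injEq, Prod.mk.injEq, and_true, true_and] <;>
    refine ⟨?_, ?_, ?_, ?_⟩ <;> omega
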